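-- pv_equiv track=rewrite | github.com/SGG-Modding/SGG-Mod-Format | SGGMI.py | modfile_tokenise
-- ===== SOURCE A (Python) =====
-- def modfile_tokenise(line):
--     groups = line.strip().split("\"")
--     for i,group in enumerate(groups):
--         if i%2:
--             groups[i] = [group]
--         else:
--             groups[i] = group.replace(" ",modfile_delimiter)
--             groups[i] = groups[i].split(modfile_delimiter)
--     tokens = []
--     for group in groups:
--         for x in group:
--             if x != '':
--                 tokens.append(x)
--     return tokens
--
-- modfile_delimiter = ","
-- ===== SOURCE B (Python) =====
-- def modfile_tokenise(line):
--     # single-pass scanner: current-token buffer + in_quote flag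
--     tokens = []
--     buf = []
--     in_quote = False
--     for ch in line.strip():
--         if ch == '"':
--             if buf:
--                 tokens.append(''.join(buf))
--                 buf = []
--             in_quote = not in_quote
--         elif not in_quote and ch in ' ,':
--             if buf:
--                 tokens.append(''.join(buf))
--                 buf = []
--         else:
--             buf.append(ch)
--     if buf:
--         tokens.append(''.join(buf))
--     return tokens
-- ===== Notes on version B (the rewrite author's own statement) =====
-- stated objective: alternative
-- what changed: Replaced the split-on-quotes / replace / re-split / flatten-filter pipeline with one stateful linear scan over the stripped line (token buffer + in_quote flag).
import Mathlib
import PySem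

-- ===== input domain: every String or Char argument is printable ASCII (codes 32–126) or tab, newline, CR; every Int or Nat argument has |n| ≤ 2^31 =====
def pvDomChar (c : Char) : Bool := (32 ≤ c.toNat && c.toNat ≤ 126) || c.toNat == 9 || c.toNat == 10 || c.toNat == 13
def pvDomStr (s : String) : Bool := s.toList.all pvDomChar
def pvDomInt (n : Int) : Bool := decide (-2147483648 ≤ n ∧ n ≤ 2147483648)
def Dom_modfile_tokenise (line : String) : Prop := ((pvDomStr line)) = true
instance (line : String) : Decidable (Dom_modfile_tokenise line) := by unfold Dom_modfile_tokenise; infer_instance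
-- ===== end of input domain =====

-- B replaces A's split-on-quotes / replace / re-split / flatten-filter pipeline with a single
-- stateful linear scan (token buffer + in_quote flag); same cost, different decomposition.


-- ===== PORT A =====
-- literal transliteration of A: strip, split on '"', enumerate (odd groups kept whole,
-- even groups: replace ' '→',' then split on ','), then flatten dropping empties.
-- (ported through PySem.Chars, with one String.ofList map at the very end)
def modfile_tokenise (line : String) : List String :=
  let groups0 : List (List Char) := PySem.Chars.splitOn (PySem.Chars.strip line.toList) ['"']
  let groups : List (List (List Char)) :=
    (PySem.List.enumerate groups0).map (fun ig =>
      if PySem.Int.mod ig.1 2 ≠ 0 then [ig.2]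
      else PySem.Chars.splitOn (PySem.Chars.replace ig.2 [' '] [',']) [','])
  (groups.foldl (fun tokens group =>
      group.foldl (fun tokens x => if x ≠ [] then tokens ++ [x] else tokens) tokens) []).map
    String.ofList

-- ===== PORT B =====
-- literal transliteration of B (Source B): one pass, current-token buffer + in_quote flag.
def mtScan : List Char → List String → List Char → Bool → List String
  | [], tokens, buf, _ => if buf.isEmpty then tokens else tokens ++ [String.ofList buf]
  | c :: cs, tokens, buf, inQuote =>
    if c = '"' then
      mtScan cs (if buf.isEmpty then tokens else tokens ++ [String.ofList buf]) [] (!inQuote)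
    else if !inQuote && (c == ' ' || c == ',') then
      mtScan cs (if buf.isEmpty then tokens else tokens ++ [String.ofList buf]) [] inQuote
    else
      mtScan cs tokens (buf ++ [c]) inQuote

def modfile_tokenise_alt (line : String) : List String :=
  mtScan (PySem.Str.strip line).toList [] [] false

-- ===== PRECONDITION & SPEC =====
def Spec_modfile_tokenise (line : String) (out : List String) : Prop := out = modfile_tokenise_alt line
instance (line : String) (out : List String) : Decidable (Spec_modfile_tokenise line out) := by unfold Spec_modfile_tokenise; infer_instance

-- ===== CLAIM (what is proved, stated in full; the proofs are below) =====
def Claim_equal_modfile_tokenise : Prop := ∀ (line : String), Dom_modfile_tokenise line → Spec_modfile_tokenise line (modfile_tokenise line)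

-- ===== LEMMAS AND PROOFS =====

-- reference splitter: split a char list at every char satisfying p, `pre` the piece built so far
def psplit (p : Char → Bool) (pre : List Char) : List Char → List (List Char)
  | [] => [pre]
  | c :: cs => if p c then pre :: psplit p [] cs else psplit p (pre ++ [c]) cs

def isWS (c : Char) : Bool := c == ' ' || c == ','

-- A's alternating processing of the quote-split groups (b = current group is quoted)
def procAll : Bool → List (List Char) → List (List Char)
  | _, [] => []
  | b, g :: gs => (if b then [g] else psplit isWS [] g) ++ procAll (!b) gs

-- reference form of B's scanner: the raw pieces it finalises, in order, empties included
def fuse : Bool → List Char → List Char → List (List Char)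
  | _, pre, [] => [pre]
  | false, pre, c :: cs =>
      if c = '"' then pre :: fuse true [] cs
      else if isWS c then pre :: fuse false [] cs
      else fuse false (pre ++ [c]) cs
  | true, pre, c :: cs =>
      if c = '"' then pre :: fuse false [] cs
      else fuse true (pre ++ [c]) cs

theorem psplit_ne_nil (p : Char → Bool) (pre s : List Char) : psplit p pre s ≠ [] := by
  induction s generalizing pre with
  | nil => simp [psplit]
  | cons c cs ih => simp only [psplit]; split <;> simp [ih]

theorem psplit_acc (p : Char → Bool) (s : List Char) : ∀ pre,
    psplit p pre s = (pre ++ (psplit p [] s).headI) :: (psplit p [] s).tail := by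
  induction s with
  | nil => intro pre; simp [psplit]
  | cons c cs ih =>
    intro pre
    by_cases hc : p c
    · simp [psplit, hc]
    · simp only [psplit, hc, Bool.false_eq_true, ite_false, List.nil_append]
      rw [ih (pre ++ [c]), ih [c]]
      simp

theorem splitOn_go_eq (q : Char) : ∀ (fuel : Nat) (l cur : List Char)
    (acc2 : List (List Char)), l.length < fuel →
    PySem.Chars.splitOn.go [q] fuel l cur acc2 = acc2.reverse ++ psplit (fun c => c == q) cur.reverse l := by
  intro fuel
  induction fuel with
  | zero => intro l cur acc2 h; exact absurd h (by omega)
  | succ n ih =>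
    intro l cur acc2 h
    cases l with
    | nil => simp [PySem.Chars.splitOn.go, psplit]
    | cons c rest =>
      simp only [PySem.Chars.splitOn.go]
      by_cases hq : q = c
      · have hpre : List.isPrefixOf [q] (c :: rest) = true := by
          simp [List.isPrefixOf, hq]
        have hdrop : List.drop ([q] : List Char).length (c :: rest) = rest := rfl
        simp only [hpre, if_true, hdrop]
        rw [ih rest [] (cur.reverse :: acc2) (by simpa using Nat.lt_of_succ_lt_succ h)]
        simp [psplit, hq]
      · have hpre : List.isPrefixOf [q] (c :: rest) = false := by
          simp [List.isPrefixOf, hq]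
        simp only [hpre, Bool.false_eq_true, if_false]
        rw [ih rest (c :: cur) acc2 (by simpa using Nat.lt_of_succ_lt_succ h)]
        have hrev : (c :: cur).reverse = cur.reverse ++ [c] := by simp
        rw [hrev]
        have hqc : (c == q) = false := by simp; exact fun hcq => hq hcq.symm

        simp [psplit, hqc]

theorem splitOn_eq_psplit (q : Char) (s : List Char) :
    PySem.Chars.splitOn s [q] = psplit (fun c => c == q) [] s := by
  show PySem.Chars.splitOn.go [q] (s.length + 1) s [] [] = _
  rw [splitOn_go_eq q (s.length + 1) s [] [] (by omega)]
  simp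

def subComma (c : Char) : Char := if c == ' ' then ',' else c

theorem replace_go_eq : ∀ (fuel : Nat) (l acc : List Char), l.length ≤ fuel →
    PySem.Chars.replace.go [' '] [','] fuel l acc = acc.reverse ++ l.map subComma := by
  intro fuel
  induction fuel with
  | zero =>
    intro l acc h
    have : l = [] := by cases l <;> simp_all
    subst this; simp [PySem.Chars.replace.go]
  | succ n ih =>
    intro l acc h
    cases l with
    | nil => simp [PySem.Chars.replace.go]
    | cons c t =>
      simp only [PySem.Chars.replace.go]
      by_cases hc : c = ' '
      · have hpre : List.isPrefixOf [' '] (c :: t) = true := by simp [List.isPrefixOf, hc]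
        have hdrop : List.drop ([' '] : List Char).length (c :: t) = t := rfl
        simp only [hpre, if_true, hdrop]
        rw [ih t _ (by simpa using Nat.le_of_succ_le_succ h)]
        simp [subComma, hc]
      · have hpre : List.isPrefixOf [' '] (c :: t) = false := by
          simp [List.isPrefixOf]; exact fun hcq => hc hcq.symm
        simp only [hpre, Bool.false_eq_true, if_false]
        rw [ih t _ (by simpa using Nat.le_of_succ_le_succ h)]
        have hsc : subComma c = c := by simp [subComma, hc]
        simp [hsc]

theorem replace_eq_map (s : List Char) :
    PySem.Chars.replace s [' '] [','] = s.map subComma := by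
  show (if ([' '] : List Char).isEmpty = true then _ else PySem.Chars.replace.go [' '] [','] s.length s []) = _
  simp only [List.isEmpty_cons, Bool.false_eq_true, if_false]
  rw [replace_go_eq s.length s [] (le_refl _)]
  simp

theorem psplit_comma_map (g : List Char) : ∀ pre,
    psplit (fun c => c == ',') pre (g.map subComma) = psplit isWS pre g := by
  induction g with
  | nil => intro pre; simp [psplit]
  | cons c cs ih =>
    intro pre
    by_cases hw : isWS c = true
    · have hsc : (subComma c == ',') = true := by
        simp [isWS] at hw
        rcases hw with h | h <;> simp [subComma, h]
      simp only [List.map_cons, psplit, hsc, hw, if_true]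
      rw [ih []]
    · have hc : (c == ' ') = false ∧ (c == ',') = false := by
        simp [isWS] at hw; simp [hw]
      have hsc : (subComma c == ',') = false := by simp [subComma, hc.1, hc.2]
      have hscc : subComma c = c := by simp [subComma, hc.1]
      simp only [List.map_cons, psplit, hsc, hw, Bool.false_eq_true, if_false]
      rw [hscc, ih (pre ++ [c])]

-- A's double foldl collects exactly the nonempty pieces in order
theorem foldl_outer (groups : List (List (List Char))) : ∀ (tk : List (List Char)),
    groups.foldl (fun tokens group =>
      group.foldl (fun tokens x => if x ≠ [] then tokens ++ [x] else tokens) tokens) tk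
    = tk ++ (groups.flatten.filter (fun x => x ≠ [])) := by
  induction groups with
  | nil => intro tk; simp
  | cons g gs ih =>
    intro tk
    simp only [List.foldl_cons, List.flatten_cons, List.filter_append]
    rw [show (g.foldl (fun tokens x => if x ≠ [] then tokens ++ [x] else tokens) tk)
        = tk ++ List.map id (g.filter (fun x => x ≠ [])) from by
          simpa using PySem.List.foldl_append_if (fun x => x ≠ []) id g tk]
    rw [ih]
    simp

theorem parity_flip (i : Int) :
    (decide (PySem.Int.mod (i + 1) 2 ≠ 0)) = !(decide (PySem.Int.mod i 2 ≠ 0)) := by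
  rw [PySem.Int.mod_eq_emod_of_pos (by omega), PySem.Int.mod_eq_emod_of_pos (by omega)]
  by_cases h : i % 2 = 0
  · have : (i + 1) % 2 ≠ 0 := by omega
    simp [h, this]
  · have : (i + 1) % 2 = 0 := by omega
    simp [h, this]

theorem flat_enum (gs : List (List Char)) : ∀ (i : Int),
    (((PySem.List.enumerate gs i).map (fun ig =>
        if PySem.Int.mod ig.1 2 ≠ 0 then [ig.2]
        else PySem.Chars.splitOn (PySem.Chars.replace ig.2 [' '] [',']) [','])).flatten)
    = procAll (decide (PySem.Int.mod i 2 ≠ 0)) gs := by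
  induction gs with
  | nil => intro i; simp [PySem.List.enumerate, procAll]
  | cons g t ih =>
    intro i
    simp only [PySem.List.enumerate, List.map_cons, List.flatten_cons]
    rw [ih (i + 1), parity_flip i]
    by_cases h : PySem.Int.mod i 2 ≠ 0
    · have hd : (decide (PySem.Int.mod i 2 ≠ 0)) = true := decide_eq_true h
      rw [hd, if_pos h]
      simp [procAll]
    · have hd : (decide (PySem.Int.mod i 2 ≠ 0)) = false := decide_eq_false h
      rw [hd, if_neg h]
      simp only [procAll, Bool.not_false, Bool.false_eq_true, if_false]
      rw [replace_eq_map, splitOn_eq_psplit, psplit_comma_map]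

-- characterization of A
theorem A_char (line : String) :
    modfile_tokenise line
    = ((procAll false (psplit (fun c => c == '"') [] (PySem.Chars.strip line.toList))).filter
        (fun x => x ≠ [])).map String.ofList := by
  unfold modfile_tokenise
  dsimp only []
  rw [foldl_outer, flat_enum]
  simp [splitOn_eq_psplit]

-- the scanner's pieces are the alternating processing of the quote-split groups
theorem fuse_joint (s : List Char) :
    (∀ w, fuse false w s
        = psplit isWS w ((psplit (fun c => c == '"') [] s).headI)
          ++ procAll true ((psplit (fun c => c == '"') [] s).tail))
    ∧ (∀ p, fuse true p s
        = (p ++ (psplit (fun c => c == '"') [] s).headI)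
          :: procAll false ((psplit (fun c => c == '"') [] s).tail)) := by
  induction s with
  | nil => constructor <;> intro w <;> simp [fuse, psplit, procAll]
  | cons c cs ih =>
    obtain ⟨ihF, ihT⟩ := ih
    obtain ⟨h, t, hht⟩ : ∃ h t, psplit (fun c => c == '"') [] cs = h :: t := by
      cases hq : psplit (fun c => c == '"') [] cs with
      | nil => exact absurd hq (psplit_ne_nil _ _ _)
      | cons h t => exact ⟨h, t, rfl⟩
    by_cases hq : c = '"'
    · have hqc : (c == '"') = true := by simp [hq]
      constructor
      · intro w
        simp only [fuse, hq, if_true, psplit]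
        rw [ihT [], hht]
        simp [psplit, procAll]
      · intro p
        simp only [fuse, hq, if_true, psplit]
        rw [ihF [], hht]
        simp [procAll]
    · have hqc : (c == '"') = false := by simp [hq]
      have hps : psplit (fun c => c == '"') [] (c :: cs) = (c :: h) :: t := by
        simp only [psplit, hqc, Bool.false_eq_true, if_false]
        rw [psplit_acc, hht]; simp
      by_cases hw : isWS c = true
      · constructor
        · intro w
          simp only [fuse, hq, if_false, hw, if_true, hps]
          rw [ihF [], hht]
          simp only [List.headI, List.tail]
          simp [psplit, hw]
        · intro p
          simp only [fuse, hq, if_false, hps]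
          rw [ihT (p ++ [c]), hht]
          simp
      · constructor
        · intro w
          simp only [fuse, hq, if_false, hw, Bool.false_eq_true, hps]
          rw [ihF (w ++ [c]), hht]
          simp only [List.headI, List.tail]
          simp [psplit, hw]
        · intro p
          simp only [fuse, hq, if_false, hps]
          rw [ihT (p ++ [c]), hht]
          simp

-- B's scanner emits exactly the nonempty pieces of `fuse`
theorem mtScan_eq (s : List Char) : ∀ (tokens : List String) (buf : List Char) (inq : Bool),
    mtScan s tokens buf inq
    = tokens ++ ((fuse inq buf s).filter (fun x => x ≠ [])).map String.ofList := by
  induction s with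
  | nil =>
    intro tokens buf inq
    cases inq <;>
    · by_cases hb : buf = []
      · simp [mtScan, fuse, hb]
      · simp [mtScan, fuse, hb, List.isEmpty_iff]
  | cons c cs ih =>
    intro tokens buf inq
    have hemit : (if buf.isEmpty then tokens else tokens ++ [String.ofList buf])
        = tokens ++ (List.map String.ofList (List.filter (fun x => x ≠ []) [buf])) := by
      by_cases hb : buf = [] <;> simp [hb, List.isEmpty_iff]
    by_cases hq : c = '"'
    · cases inq <;>
      · simp only [mtScan, hq, if_true]
        rw [ih, hemit]
        by_cases hb : buf = [] <;> simp [fuse, hb]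
    · cases inq with
      | false =>
        by_cases hw : (c == ' ' || c == ',') = true
        · simp only [mtScan, hq, if_false, Bool.not_false, Bool.true_and, hw, if_true]
          rw [ih, hemit]
          have hWS : isWS c = true := hw
          by_cases hb : buf = [] <;> simp [fuse, hq, hWS, hb]
        · simp only [mtScan, hq, if_false, Bool.not_false, Bool.true_and, hw, Bool.false_eq_true]
          rw [ih]
          have hWS : isWS c = false := by
            simp only [isWS, Bool.not_eq_true] at hw ⊢; exact hw
          simp [fuse, hq, hWS]
      | true =>
        simp only [mtScan, hq, if_false, Bool.not_true, Bool.false_and, Bool.false_eq_true]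
        rw [ih]
        simp [fuse, hq]

theorem B_char (line : String) :
    modfile_tokenise_alt line
    = ((fuse false [] (PySem.Chars.strip line.toList)).filter (fun x => x ≠ [])).map
        String.ofList := by
  unfold modfile_tokenise_alt
  rw [PySem.Str.toList_strip, mtScan_eq]
  simp

-- ===== VERDICT (by name: the statement is the Claim_ definition above) =====
theorem modfile_tokenise_spec : Claim_equal_modfile_tokenise := by
  intro line _
  show modfile_tokenise line = modfile_tokenise_alt line
  rw [A_char, B_char]
  obtain ⟨h, t, hht⟩ : ∃ h t,
      psplit (fun c => c == '"') [] (PySem.Chars.strip line.toList) = h :: t := by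
    cases hq : psplit (fun c => c == '"') [] (PySem.Chars.strip line.toList) with
    | nil => exact absurd hq (psplit_ne_nil _ _ _)
    | cons h t => exact ⟨h, t, rfl⟩
  rw [(fuse_joint (PySem.Chars.strip line.toList)).1 [], hht]
  simp [procAll]
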